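-- pv_equiv track=rewrite | github.com/michelesr/advent-of-code | 2024/day-15/main.py | scale_grid
-- ===== SOURCE A (Python) =====
-- def scale_grid(grid):
--     grid = [
--         "".join(row)
--         .replace("#", "##")
--         .replace("O", "[]")
--         .replace(".", "..")
--         .replace("@", "@.")
--         for row in grid
--     ]
--     return [list(line) for line in grid]
-- ===== SOURCE B (Python) =====
-- EXPAND = {'#': '##', 'O': '[]', '.': '..', '@': '@.'}
--
--
-- def scale_grid(grid):
--     return [
--         [ch for s in row for c in s for ch in EXPAND.get(c, c)]
--         for row in grid
--     ]
-- ===== Notes on version B (the rewrite author's own statement) =====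
-- stated objective: idiomatic
-- what changed: Replaces the join + four chained str.replace scans per row with a single character-by-character pass driven by an expansion table (dict lookup), building each output row directly.
import Mathlib
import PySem

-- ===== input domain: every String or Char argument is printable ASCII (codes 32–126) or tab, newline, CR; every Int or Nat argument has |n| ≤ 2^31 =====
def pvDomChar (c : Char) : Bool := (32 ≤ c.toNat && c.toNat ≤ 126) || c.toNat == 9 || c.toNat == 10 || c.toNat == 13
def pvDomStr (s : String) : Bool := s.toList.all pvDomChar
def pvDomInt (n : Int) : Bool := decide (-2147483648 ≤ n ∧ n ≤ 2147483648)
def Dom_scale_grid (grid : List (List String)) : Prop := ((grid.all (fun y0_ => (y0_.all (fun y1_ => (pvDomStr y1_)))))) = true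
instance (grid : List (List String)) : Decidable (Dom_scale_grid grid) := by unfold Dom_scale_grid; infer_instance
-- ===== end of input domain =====

-- B replaces A's join + four chained str.replace scans per row with one table-driven
-- character-by-character pass (idiomatic; same asymptotic cost).

-- ===== PORT A =====
-- "".join(row).replace("#","##").replace("O","[]").replace(".","..").replace("@","@."), then list(line)
def scale_grid (grid : List (List String)) : List (List String) :=
  let grid' := grid.map (fun row =>
    PySem.Str.replace
      (PySem.Str.replace
        (PySem.Str.replace
          (PySem.Str.replace (PySem.Str.join "" row) "#" "##")
          "O" "[]")
        "." "..")
      "@" "@.")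
  grid'.map (fun line => line.toList.map (fun c => String.ofList [c]))

-- ===== PORT B =====
-- EXPAND = {'#': '##', 'O': '[]', '.': '..', '@': '@.'}
def pvExpandTable : PySem.Dict Char String :=
  PySem.Dict.mk [('#', "##"), ('O', "[]"), ('.', ".."), ('@', "@.")]

-- [[ch for s in row for c in s for ch in EXPAND.get(c, c)] for row in grid]
def scale_grid_alt (grid : List (List String)) : List (List String) :=
  grid.map (fun row =>
    row.flatMap (fun s =>
      s.toList.flatMap (fun c =>
        (PySem.Dict.getD pvExpandTable c (String.ofList [c])).toList.map
          (fun ch => String.ofList [ch]))))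

-- ===== PRECONDITION & SPEC =====
def Spec_scale_grid (grid : List (List String)) (out : List (List String)) : Prop := out = scale_grid_alt grid
instance (grid : List (List String)) (out : List (List String)) : Decidable (Spec_scale_grid grid out) := by unfold Spec_scale_grid; infer_instance

-- ===== CLAIM (what is proved, stated in full; the proofs are below) =====
def Claim_equal_scale_grid : Prop := ∀ (grid : List (List String)), Dom_scale_grid grid → Spec_scale_grid grid (scale_grid grid)

-- ===== LEMMAS AND PROOFS =====

-- single-character replacement as a per-character flatMap
theorem replace_go_single (o : Char) (n : List Char) :
    ∀ (fuel : Nat) (l acc : List Char), l.length ≤ fuel →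
      PySem.Chars.replace.go [o] n fuel l acc
        = acc.reverse ++ l.flatMap (fun c => if c = o then n else [c]) := by
  intro fuel
  induction fuel with
  | zero =>
      intro l acc h
      have hl : l = [] := List.eq_nil_of_length_eq_zero (Nat.le_zero.mp h)
      subst hl
      simp [PySem.Chars.replace.go]
  | succ fuel ih =>
      intro l acc h
      cases l with
      | nil => simp [PySem.Chars.replace.go]
      | cons c t =>
          rw [show PySem.Chars.replace.go [o] n (fuel + 1) (c :: t) acc =
                (if [o].isPrefixOf (c :: t) = true then
                  PySem.Chars.replace.go [o] n fuel (List.drop (List.length [o]) (c :: t))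
                    (n.reverse ++ acc)
                else PySem.Chars.replace.go [o] n fuel t (c :: acc)) from rfl]
          by_cases hc : c = o
          · subst hc
            have hpre : [c].isPrefixOf (c :: t) = true := by simp [List.isPrefixOf]
            rw [if_pos hpre]
            rw [show List.drop (List.length [c]) (c :: t) = t from rfl]
            rw [ih t (n.reverse ++ acc) (by simpa using Nat.le_of_succ_le_succ h)]
            simp
          · have hpre : ¬ ([o].isPrefixOf (c :: t) = true) := by
              simp [List.isPrefixOf]
              exact fun hoc => hc hoc.symm
            rw [if_neg hpre]
            rw [ih t (c :: acc) (by simpa using Nat.le_of_succ_le_succ h)]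
            simp [hc]

theorem replace_single (o : Char) (n cs : List Char) :
    PySem.Chars.replace cs [o] n = cs.flatMap (fun c => if c = o then n else [c]) := by
  unfold PySem.Chars.replace
  simp only [List.isEmpty_cons, if_false, Bool.false_eq_true]
  exact replace_go_single o n cs.length cs [] (le_refl _)

-- the combined per-character expansion (at the List Char level)
def pvExpandL (c : Char) : List Char :=
  if c = '#' then ['#', '#']
  else if c = 'O' then ['[', ']']
  else if c = '.' then ['.', '.']
  else if c = '@' then ['@', '.']
  else [c]

theorem flatMap_flatMap' {α β γ : Type} (l : List α) (f : α → List β) (g : β → List γ) :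
    (l.flatMap f).flatMap g = l.flatMap (fun x => (f x).flatMap g) := by
  induction l with
  | nil => simp
  | cons a t ih => simp [List.flatMap_cons, ih]

theorem chain_eq_expand (cs : List Char) :
    (((cs.flatMap (fun c => if c = '#' then ['#','#'] else [c])).flatMap
        (fun c => if c = 'O' then ['[',']'] else [c])).flatMap
        (fun c => if c = '.' then ['.','.'] else [c])).flatMap
        (fun c => if c = '@' then ['@','.'] else [c])
      = cs.flatMap pvExpandL := by
  rw [flatMap_flatMap', flatMap_flatMap', flatMap_flatMap']
  apply List.flatMap_congr
  intro c _
  by_cases h1 : c = '#'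
  · subst h1; decide
  by_cases h2 : c = 'O'
  · subst h2; decide
  by_cases h3 : c = '.'
  · subst h3; decide
  by_cases h4 : c = '@'
  · subst h4; decide
  simp [pvExpandL, h1, h2, h3, h4]

-- the table lookup of B computes pvExpandL (as a string)
theorem getD_table (c : Char) :
    (PySem.Dict.getD pvExpandTable c (String.ofList [c])).toList = pvExpandL c := by
  by_cases h1 : c = '#'
  · subst h1; simp [pvExpandTable, pvExpandL, PySem.Dict.getD, PySem.Dict.get?_mk_cons]
  by_cases h2 : c = 'O'
  · subst h2; simp [pvExpandTable, pvExpandL, PySem.Dict.getD, PySem.Dict.get?_mk_cons]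
  by_cases h3 : c = '.'
  · subst h3; simp [pvExpandTable, pvExpandL, PySem.Dict.getD, PySem.Dict.get?_mk_cons]
  by_cases h4 : c = '@'
  · subst h4; simp [pvExpandTable, pvExpandL, PySem.Dict.getD, PySem.Dict.get?_mk_cons]
  have b1 : ('#' == c) = false := beq_eq_false_iff_ne.mpr (fun h => h1 h.symm)
  have b2 : ('O' == c) = false := beq_eq_false_iff_ne.mpr (fun h => h2 h.symm)
  have b3 : ('.' == c) = false := beq_eq_false_iff_ne.mpr (fun h => h3 h.symm)
  have b4 : ('@' == c) = false := beq_eq_false_iff_ne.mpr (fun h => h4 h.symm)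
  simp [pvExpandTable, pvExpandL, PySem.Dict.getD,
    PySem.Dict.get?, b1, b2, b3, b4, h1, h2, h3, h4]

theorem join_empty : ∀ (parts : List (List Char)),
    PySem.Chars.join [] parts = parts.flatten
  | [] => by simp [PySem.Chars.join, List.intercalate]
  | [a] => by simp [PySem.Chars.join, List.intercalate]
  | a :: b :: t => by
      have ih := join_empty (b :: t)
      simp [PySem.Chars.join, List.intercalate] at ih ⊢
      simpa using ih

-- ===== VERDICT (by name: the statement is the Claim_ definition above) =====
theorem scale_grid_spec : Claim_equal_scale_grid := by
  intro grid _
  unfold Spec_scale_grid scale_grid scale_grid_alt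
  simp only [List.map_map]
  apply List.map_congr_left
  intro row _
  simp only [Function.comp,
    PySem.Str.toList_replace, PySem.Str.toList_join]
  show ((PySem.Chars.replace (PySem.Chars.replace (PySem.Chars.replace (PySem.Chars.replace
      (PySem.Chars.join "".toList (row.map String.toList))
      "#".toList "##".toList) "O".toList "[]".toList) ".".toList "..".toList)
      "@".toList "@.".toList).map (fun c => String.ofList [c])) = _
  rw [show "".toList = ([] : List Char) by decide]
  rw [join_empty]
  rw [show "#".toList = ['#'] by decide, show "O".toList = ['O'] by decide,
      show ".".toList = ['.'] by decide, show "@".toList = ['@'] by decide,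
      show "##".toList = ['#','#'] by decide, show "[]".toList = ['[',']'] by decide,
      show "..".toList = ['.','.'] by decide, show "@.".toList = ['@','.'] by decide]
  rw [replace_single, replace_single, replace_single, replace_single]
  rw [chain_eq_expand]
  rw [List.map_flatMap, ← List.flatMap_def, flatMap_flatMap']
  apply List.flatMap_congr
  intro s _
  apply List.flatMap_congr
  intro c _
  rw [getD_table]
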